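-- pv_equiv track=rewrite | github.com/AnTitova/2019-2-level-labs | lab_1/main.py | filter_stop_words
-- ===== SOURCE A (Python) =====
-- def filter_stop_words(frequencies: dict, stop_words: tuple) -> dict:
--     if frequencies is None:
--         return frequencies
--     for i in list(frequencies):
--         if not isinstance(i, str):
--             del frequencies[i]
--     if not isinstance(stop_words, tuple):
--         return frequencies
--     for i in stop_words:
--         if not isinstance(i, str):
--             continue
--         if frequencies.get(i) is not None:
--             del frequencies[i]
--     return frequencies
-- ===== SOURCE B (Python) =====
-- def filter_stop_words(frequencies: dict, stop_words: tuple) -> dict: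
--     stops = set(stop_words)
--     for word in list(frequencies):
--         if word in stops:
--             del frequencies[word]
--     return frequencies
-- ===== Notes on version B (the rewrite author's own statement) =====
-- stated objective: simpler
-- what changed: B builds a set of the stop words once and makes a single pass over the dict keys deleting stop-word keys by set membership, instead of A's pass over stop_words with a dict lookup and per-word delete; A's isinstance/None guards are vacuous on the typed domain (string keys, int values, tuple stop words) and are dropped.
import Mathlib
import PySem

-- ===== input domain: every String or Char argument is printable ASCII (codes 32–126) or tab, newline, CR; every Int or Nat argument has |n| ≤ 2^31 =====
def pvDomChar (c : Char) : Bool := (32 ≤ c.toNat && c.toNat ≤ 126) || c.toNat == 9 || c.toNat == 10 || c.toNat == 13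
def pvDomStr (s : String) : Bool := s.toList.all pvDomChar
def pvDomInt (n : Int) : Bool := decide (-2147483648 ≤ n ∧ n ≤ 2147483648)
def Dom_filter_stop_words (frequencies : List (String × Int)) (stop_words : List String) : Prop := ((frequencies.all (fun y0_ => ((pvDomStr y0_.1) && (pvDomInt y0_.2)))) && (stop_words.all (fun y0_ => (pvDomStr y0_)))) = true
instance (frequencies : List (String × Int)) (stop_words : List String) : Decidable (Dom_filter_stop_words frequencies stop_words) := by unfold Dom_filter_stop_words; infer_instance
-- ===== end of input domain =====

-- B makes one pass over the dict keys against a prebuilt stop-word set instead of A's pass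
-- over stop_words with a dict lookup and delete per stop word; the Python mutates
-- `frequencies` in place and returns it — the equivalence proved here is about the returned
-- value (B performs the same in-place mutation).

-- ===== PORT A =====
-- the dict is the association list; `frequencies.get(i) is not None` is a find?,
-- `del frequencies[i]` removes the key (filter); the isinstance branches are
-- identically true/false under the type convention (all keys/stop words are str,
-- stop_words is a tuple, frequencies is not None) and so drop out.
def filter_stop_words (frequencies : List (String × Int)) (stop_words : List String) : List (String × Int) :=
  stop_words.foldl
    (fun d i =>
      if (d.find? (fun p => p.1 == i)).isSome then d.filter (fun p => p.1 != i) else d)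
    frequencies

-- ===== PORT B =====
-- build the stop-word set once, then one pass over the dict deleting members
def filter_stop_words_alt (frequencies : List (String × Int)) (stop_words : List String) : List (String × Int) :=
  let stops : PySem.Set String := PySem.Set.ofList stop_words
  frequencies.filter (fun p => !(PySem.Set.contains stops p.1))

-- ===== PRECONDITION & SPEC =====
def Spec_filter_stop_words (frequencies : List (String × Int)) (stop_words : List String) (out : List (String × Int)) : Prop := out = filter_stop_words_alt frequencies stop_words
instance (frequencies : List (String × Int)) (stop_words : List String) (out : List (String × Int)) : Decidable (Spec_filter_stop_words frequencies stop_words out) := by unfold Spec_filter_stop_words; infer_instance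

-- ===== CLAIM (what is proved, stated in full; the proofs are below) =====
def Claim_equal_filter_stop_words : Prop := ∀ (frequencies : List (String × Int)) (stop_words : List String), Dom_filter_stop_words frequencies stop_words → Spec_filter_stop_words frequencies stop_words (filter_stop_words frequencies stop_words)

-- ===== LEMMAS AND PROOFS =====

-- A's guarded step is an unconditional filter: when no entry has key i, filtering i away is a no-op.
theorem stepA_eq_filter (d : List (String × Int)) (i : String) :
    (if (d.find? (fun p => p.1 == i)).isSome then d.filter (fun p => p.1 != i) else d)
      = d.filter (fun p => p.1 != i) := by
  by_cases h : (d.find? (fun p => p.1 == i)).isSome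
  · simp [h]
  · simp only [h, if_neg, Bool.false_eq_true, not_false_eq_true]
    symm
    apply List.filter_eq_self.mpr
    intro p hp
    simp only [List.find?_isSome, not_exists, not_and] at h
    simpa using h p hp

-- the fold of filters over stop_words is one filter by list membership
theorem foldA_eq_filter (stop_words : List String) (d : List (String × Int)) :
    stop_words.foldl
      (fun d i =>
        if (d.find? (fun p => p.1 == i)).isSome then d.filter (fun p => p.1 != i) else d)
      d
      = d.filter (fun p => !(stop_words.contains p.1)) := by
  induction stop_words generalizing d with
  | nil => simp
  | cons i sw ih =>
    rw [List.foldl_cons, stepA_eq_filter, ih, List.filter_filter]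
    apply List.filter_congr
    intro p _
    simp only [List.contains_cons, Bool.not_or, Bool.and_comm, bne]

-- ===== VERDICT (by name: the statement is the Claim_ definition above) =====
theorem filter_stop_words_spec : Claim_equal_filter_stop_words := by
  intro frequencies stop_words _
  unfold Spec_filter_stop_words filter_stop_words filter_stop_words_alt
  rw [foldA_eq_filter]
  apply List.filter_congr
  intro p _
  simp [PySem.Set.contains_eq_listContains]
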